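-- pv_equiv track=rewrite | github.com/Vikaslakkacs/Python-Capstone-projects | Prime_factorizatoin.py | last_factor
-- ===== SOURCE A (Python) =====
-- def last_factor(number):
--     counter=0
--     for factor in range (number,1,-1):
--         if number % factor ==0:
--             counter +=1
--             last_factor=factor
--             if counter==2:#Considering the second largest factor for the given number
--                 return last_factor
--                 break
--     return last_factor#if no number is the second largest factor then consider the actual number as the factor and return
-- ===== SOURCE B (Python) =====
-- def last_factor(number):
--     # Smallest prime factor by trial division up to sqrt(number):
--     # the second largest divisor is number // spf; a prime is its own answer.
--     p = 2
--     while p * p <= number: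
--         if number % p == 0:
--             return number // p
--         p += 1
--     return number
-- ===== Notes on version B (the rewrite author's own statement) =====
-- stated objective: faster
-- what changed: Instead of scanning every candidate downward from number until the second divisor appears (O(n)), B trial-divides upward only to sqrt(number) to find the smallest prime factor p and returns number//p (or number when prime).
-- outside the precondition, e.g. on last_factor(1): A raises UnboundLocalError, B returns 1
import Mathlib
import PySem

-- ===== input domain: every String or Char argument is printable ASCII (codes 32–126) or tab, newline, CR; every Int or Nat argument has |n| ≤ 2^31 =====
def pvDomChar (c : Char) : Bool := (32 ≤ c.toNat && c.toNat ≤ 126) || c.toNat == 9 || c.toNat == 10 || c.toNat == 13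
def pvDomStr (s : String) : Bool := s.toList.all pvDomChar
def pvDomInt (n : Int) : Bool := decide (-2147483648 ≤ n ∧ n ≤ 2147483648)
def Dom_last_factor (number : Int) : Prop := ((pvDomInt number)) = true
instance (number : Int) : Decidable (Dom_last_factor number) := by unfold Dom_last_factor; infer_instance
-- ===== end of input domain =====

-- B replaces A's downward scan for the second divisor by trial division up to sqrt(number)
-- for the smallest prime factor p, returning number // p (number itself if prime).

-- ===== PORT A =====
-- the for-loop of A: state = (counter, last) where last is Python's local `last_factor`
-- (none while unassigned; the final `last.getD 0` is the UnboundLocalError spot, outside Pre_).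
def lastFactorLoopA (number : Int) : List Int → Int → Option Int → Int
  | [], _, last => last.getD 0
  | f :: rest, counter, last =>
    if PySem.Int.mod number f = 0 then
      if counter + 1 = 2 then f
      else lastFactorLoopA number rest (counter + 1) (some f)
    else lastFactorLoopA number rest counter last

def last_factor (number : Int) : Int :=
  lastFactorLoopA number (PySem.List.pyRange number 1 (-1)) 0 none

-- ===== PORT B =====
-- the while-loop of B: `while p * p <= number`; fuel bounds the iteration count
-- (number.natAbs iterations always suffice, since the loop stops once p*p > number).
def lastFactorLoopB (number : Int) : Nat → Int → Int
  | 0, _ => number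
  | fuel + 1, p =>
    if p * p ≤ number then
      if PySem.Int.mod number p = 0 then PySem.Int.floordiv number p
      else lastFactorLoopB number fuel (p + 1)
    else number

def last_factor_alt (number : Int) : Int :=
  lastFactorLoopB number number.natAbs 2

-- ===== PRECONDITION & SPEC =====
-- Pre_ excludes number ≤ 1, where A's loop body never runs and the trailing
-- `return last_factor` raises UnboundLocalError.
def Pre_last_factor (number : Int) : Prop := 2 ≤ number
instance (number : Int) : Decidable (Pre_last_factor number) := by unfold Pre_last_factor; infer_instance
def pvWitness_last_factor : Int := 12

def Spec_last_factor (number : Int) (out : Int) : Prop := out = last_factor_alt number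
instance (number : Int) (out : Int) : Decidable (Spec_last_factor number out) := by unfold Spec_last_factor; infer_instance

-- ===== CLAIM (what is proved, stated in full; the proofs are below) =====
def Claim_equal_last_factor : Prop := ∀ (number : Int), Dom_last_factor number → Pre_last_factor number → Spec_last_factor number (last_factor number)

-- ===== LEMMAS AND PROOFS =====

-- the common value: number's largest proper divisor ≥ 2 when composite, number itself when prime
def pvAnswer (m : Nat) : Int := if m.Prime then (m : Int) else ((m / m.minFac : Nat) : Int)

-- A's loop once the first divisor (number itself) has been consumed: first divisor in L, else v
lemma aLoop_find (number v : Int) (L : List Int) :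
    lastFactorLoopA number L 1 (some v)
      = (L.find? (fun f => decide (PySem.Int.mod number f = 0))).getD v := by
  induction L with
  | nil => rfl
  | cons f rest ih =>
      by_cases h : PySem.Int.mod number f = 0 <;>
        simp [lastFactorLoopA, List.find?, h, ih]

-- no divisor of n in [2, k] ⇒ the descending scan finds nothing
lemma findDesc_none (n : Int) (k : Nat)
    (h : ∀ d : Int, 2 ≤ d → d ≤ (k : Int) → ¬ d ∣ n) :
    (PySem.List.pyRange (k : Int) 1 (-1)).find? (fun f => decide (PySem.Int.mod n f = 0)) = none := by
  induction k with
  | zero => rw [PySem.List.pyRange_neg_one_eq_nil (by omega)]; rfl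
  | succ k ih =>
      by_cases hk : k = 0
      · subst hk; rw [PySem.List.pyRange_neg_one_eq_nil (by omega)]; rfl
      · rw [PySem.List.pyRange_neg_one_cons (by omega : (1:Int) < (k+1:Nat))]
        have hnd : ¬ ((k+1 : Nat) : Int) ∣ n := h _ (by push_cast; omega) le_rfl
        have hm : PySem.Int.mod n ((k+1 : Nat) : Int) ≠ 0 :=
          fun hc => hnd ((PySem.Int.mod_eq_zero_iff_dvd n _).mp hc)
        rw [List.find?_cons]
        simp only [hm]
        have he : ((k+1 : Nat) : Int) - 1 = (k : Int) := by push_cast; ring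
        rw [he]
        exact ih (fun d h2 hle => h d h2 (by push_cast; omega))

-- d0 divides n, nothing above d0 up to k does ⇒ the descending scan finds exactly d0
lemma findDesc_some (n d0 : Int) (k : Nat) (h2 : 2 ≤ d0) (hdvd : d0 ∣ n)
    (hle : d0 ≤ (k : Int)) (hmax : ∀ j : Int, d0 < j → j ≤ (k : Int) → ¬ j ∣ n) :
    (PySem.List.pyRange (k : Int) 1 (-1)).find? (fun f => decide (PySem.Int.mod n f = 0)) = some d0 := by
  induction k with
  | zero => omega
  | succ k ih =>
      rw [PySem.List.pyRange_neg_one_cons (by push_cast; omega : (1:Int) < ((k+1:Nat) : Int))]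
      rw [List.find?_cons]
      by_cases hd : d0 = ((k+1 : Nat) : Int)
      · have hdd : ((k:Int) + 1) ∣ n := by
          rw [show ((k:Int)+1) = ((k+1:Nat):Int) by push_cast; ring, ← hd]; exact hdvd
        simp [hdd, hd]
      · have hnd : ¬ ((k+1 : Nat) : Int) ∣ n := hmax _ (by omega) le_rfl
        have hm : PySem.Int.mod n ((k+1 : Nat) : Int) ≠ 0 :=
          fun hc => hnd ((PySem.Int.mod_eq_zero_iff_dvd n _).mp hc)
        simp only [hm]
        have he : ((k+1 : Nat) : Int) - 1 = (k : Int) := by push_cast; ring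
        rw [he]
        exact ih (by push_cast at hle ⊢; omega) (fun j hj hjle => hmax j hj (by push_cast; omega))

-- composite m: m / minFac m is a divisor in [2, m-1] and the largest one
lemma compositeFacts (m : Nat) (hm : 2 ≤ m) (hnp : ¬ m.Prime) :
    2 ≤ m / m.minFac ∧ (m / m.minFac) ≤ m - 1
    ∧ ((m / m.minFac : Nat) : Int) ∣ (m : Int)
    ∧ ∀ j : Int, ((m / m.minFac : Nat) : Int) < j → j ≤ ((m-1:Nat) : Int) → ¬ j ∣ (m : Int) := by
  have hm1 : m ≠ 1 := by omega
  have hp : m.minFac.Prime := Nat.minFac_prime hm1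
  have hpd : m.minFac ∣ m := Nat.minFac_dvd m
  have hp2 : 2 ≤ m.minFac := hp.two_le
  have hpm : m.minFac ≠ m := fun h => hnp (h ▸ hp)
  have hc : m / m.minFac ∣ m := Nat.div_dvd_of_dvd hpd
  obtain ⟨c, hcm⟩ := hpd
  have hcdiv : m / m.minFac = c := by
    have h := Nat.mul_div_cancel_left c (Nat.minFac_pos m)
    rw [← hcm] at h; exact h
  have hc2 : 2 ≤ c := by
    rcases c with _ | _ | c
    · simp at hcm; omega
    · simp at hcm; omega
    · omega
  have hclt : m / m.minFac < m := Nat.div_lt_self (by omega) (by omega)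
  refine ⟨by omega, by omega, Int.natCast_dvd_natCast.mpr hc, ?_⟩
  intro j hjlt hjle hjd
  have hj0 : 0 ≤ j := le_trans (Int.natCast_nonneg _) (le_of_lt hjlt)
  obtain ⟨jn, rfl⟩ := Int.eq_ofNat_of_zero_le hj0
  have hjn : jn ∣ m := Int.natCast_dvd_natCast.mp hjd
  have hjlt' : m / m.minFac < jn := by exact_mod_cast hjlt
  have hjle' : jn ≤ m - 1 := by
    have : (jn : Int) ≤ ((m-1:Nat) : Int) := hjle
    exact_mod_cast this
  obtain ⟨e, hem⟩ := hjn
  have he2 : 2 ≤ e := by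
    rcases e with _ | _ | e
    · simp at hem; omega
    · simp at hem; omega
    · omega
  have hedvd : e ∣ m := ⟨jn, by rw [hem, Nat.mul_comm]⟩
  have hpe : m.minFac ≤ e := Nat.minFac_le_of_dvd he2 hedvd
  have hje : jn = m / e := by rw [hem]; exact (Nat.mul_div_cancel jn (by omega)).symm
  have : jn ≤ m / m.minFac := by
    rw [hje]; exact Nat.div_le_div_left hpe (by omega)
  omega

-- prime m: no divisor of m lies in [2, m-1]
lemma primeFacts (m : Nat) (hm : 2 ≤ m) (hp : m.Prime) :
    ∀ d : Int, 2 ≤ d → d ≤ ((m-1:Nat) : Int) → ¬ d ∣ (m : Int) := by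
  intro d h2 hle hd
  have h0 : 0 ≤ d := by omega
  obtain ⟨dn, rfl⟩ := Int.eq_ofNat_of_zero_le h0
  have hdn : dn ∣ m := Int.natCast_dvd_natCast.mp hd
  have h2' : 2 ≤ dn := by exact_mod_cast h2
  have hle' : dn ≤ m - 1 := by exact_mod_cast hle
  rcases (Nat.Prime.eq_one_or_self_of_dvd hp dn hdn) with h | h <;> omega

lemma a_char (m : Nat) (hm : 2 ≤ m) : last_factor (m : Int) = pvAnswer m := by
  unfold last_factor
  rw [PySem.List.pyRange_neg_one_cons (by exact_mod_cast hm : (1:Int) < (m : Int))]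
  have hmm : PySem.Int.mod (m : Int) (m : Int) = 0 :=
    (PySem.Int.mod_eq_zero_iff_dvd _ _).mpr dvd_rfl
  simp only [lastFactorLoopA, hmm, if_pos]
  norm_num
  have he : (m : Int) - 1 = ((m - 1 : Nat) : Int) := by omega
  rw [he, aLoop_find]
  by_cases hp : m.Prime
  · rw [findDesc_none _ _ (primeFacts m hm hp)]
    simp [pvAnswer, hp]
  · obtain ⟨h2, hle, hdvd, hmax⟩ := compositeFacts m hm hp
    rw [findDesc_some _ _ _ (by exact_mod_cast h2) hdvd (by exact_mod_cast hle) hmax]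
    simp [pvAnswer, hp]

-- B's loop invariant: p ≥ 2, no divisor of m below p, enough fuel left
lemma bLoop_char (m : Nat) (hm : 2 ≤ m) : ∀ (fuel : Nat) (p : Int), 2 ≤ p →
    (∀ q : Int, 2 ≤ q → q < p → ¬ q ∣ (m : Int)) → (m : Int) + 1 ≤ (fuel : Int) + p →
    lastFactorLoopB (m : Int) fuel p = pvAnswer m := by
  intro fuel
  induction fuel with
  | zero =>
      intro p hp2 hinv hfuel
      exact absurd dvd_rfl
        (hinv (m : Int) (by exact_mod_cast hm) (by push_cast at hfuel; omega))
  | succ fuel ih =>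
      intro p hp2 hinv hfuel
      simp only [lastFactorLoopB]
      by_cases hpp : p * p ≤ (m : Int)
      · rw [if_pos hpp]
        by_cases hmod : PySem.Int.mod (m : Int) p = 0
        · rw [if_pos hmod]
          have hpd : p ∣ (m : Int) := (PySem.Int.mod_eq_zero_iff_dvd _ _).mp hmod
          have hp0 : 0 ≤ p := by omega
          obtain ⟨pn, rfl⟩ := Int.eq_ofNat_of_zero_le hp0
          have hpn : pn ∣ m := Int.natCast_dvd_natCast.mp hpd
          have hpn2 : 2 ≤ pn := by exact_mod_cast hp2
          have hmin_le : m.minFac ≤ pn := Nat.minFac_le_of_dvd hpn2 hpn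
          have hle_min : pn ≤ m.minFac := by
            by_contra h
            push Not at h
            exact hinv (m.minFac : Int)
              (by exact_mod_cast (Nat.minFac_prime (by omega)).two_le)
              (by exact_mod_cast h)
              (Int.natCast_dvd_natCast.mpr (Nat.minFac_dvd m))
          have heq : pn = m.minFac := le_antisymm hle_min hmin_le
          have hnp : ¬ m.Prime := by
            intro hp
            have hmf : m.minFac = m := hp.minFac_eq
            have hpp' : pn * pn ≤ m := by exact_mod_cast hpp
            have : pn = m := by omega
            nlinarith
          rw [PySem.Int.floordiv_natCast]
          simp [pvAnswer, hnp, heq]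
        · rw [if_neg hmod]
          apply ih (p + 1) (by omega) ?_ (by push_cast at hfuel ⊢; omega)
          intro q hq2 hqlt
          by_cases h : q < p
          · exact hinv q hq2 h
          · have hqp : q = p := by omega
            subst hqp
            exact fun hd => hmod ((PySem.Int.mod_eq_zero_iff_dvd _ _).mpr hd)
      · rw [if_neg hpp]
        have hprime : m.Prime := by
          by_contra hnp
          have hsq : m.minFac * m.minFac ≤ m := by
            have := Nat.minFac_sq_le_self (by omega) hnp
            nlinarith [this]
          have hple : p ≤ (m.minFac : Int) := by
            by_contra h
            push Not at h
            exact hinv (m.minFac : Int)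
              (by exact_mod_cast (Nat.minFac_prime (by omega)).two_le) h
              (Int.natCast_dvd_natCast.mpr (Nat.minFac_dvd m))
          have h1 : p * p ≤ (m.minFac : Int) * (m.minFac : Int) :=
            mul_le_mul hple hple (by omega) (Int.natCast_nonneg _)
          exact hpp (le_trans h1 (by exact_mod_cast hsq))
        simp [pvAnswer, hprime]

lemma b_char (m : Nat) (hm : 2 ≤ m) : last_factor_alt (m : Int) = pvAnswer m := by
  unfold last_factor_alt
  have hab : ((m : Int)).natAbs = m := Int.natAbs_natCast m
  rw [hab]
  exact bLoop_char m hm m 2 (by omega) (fun q hq2 hqlt _ => by omega) (by omega)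

-- ===== VERDICT (by name: the statement is the Claim_ definition above) =====
theorem last_factor_spec : Claim_equal_last_factor := by
  intro number _ hpre
  have hpre' : 2 ≤ number := hpre
  have hm : number = ((number.toNat : Nat) : Int) := by omega
  have h2 : 2 ≤ number.toNat := by omega
  show last_factor number = last_factor_alt number
  rw [hm, a_char _ h2, b_char _ h2]
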